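-- pv_equiv track=rewrite | github.com/rochesterftp-sonos/HenriettaFiles | app/pages/04_Settings.py | find_matching_file
-- ===== SOURCE A (Python) =====
-- def find_matching_file(files, expected_filename):
--     """Find a file that matches the expected filename (case-insensitive)"""
--     expected_lower = expected_filename.lower()
--     for f in files:
--         if f.lower() == expected_lower:
--             return f
--     # Try partial match
--     for f in files:
--         if expected_lower in f.lower() or f.lower() in expected_lower:
--             return f
--     return None
-- ===== SOURCE B (Python) =====
-- def find_matching_file(files, expected_filename):
--     """Find a file that matches the expected filename (case-insensitive)"""
--     expected_lower = expected_filename.lower()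
--     first_partial = None
--     for f in files:
--         fl = f.lower()
--         if fl == expected_lower:
--             return f
--         if first_partial is None and (expected_lower in fl or fl in expected_lower):
--             first_partial = f
--     return first_partial
-- ===== Notes on version B (the rewrite author's own statement) =====
-- stated objective: alternative
-- what changed: Replaces A's two sequential scans (exact pass, then partial pass) with a single pass that returns immediately on an exact match and remembers the first partial candidate, lowercasing each file once instead of up to twice.
import Mathlib
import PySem

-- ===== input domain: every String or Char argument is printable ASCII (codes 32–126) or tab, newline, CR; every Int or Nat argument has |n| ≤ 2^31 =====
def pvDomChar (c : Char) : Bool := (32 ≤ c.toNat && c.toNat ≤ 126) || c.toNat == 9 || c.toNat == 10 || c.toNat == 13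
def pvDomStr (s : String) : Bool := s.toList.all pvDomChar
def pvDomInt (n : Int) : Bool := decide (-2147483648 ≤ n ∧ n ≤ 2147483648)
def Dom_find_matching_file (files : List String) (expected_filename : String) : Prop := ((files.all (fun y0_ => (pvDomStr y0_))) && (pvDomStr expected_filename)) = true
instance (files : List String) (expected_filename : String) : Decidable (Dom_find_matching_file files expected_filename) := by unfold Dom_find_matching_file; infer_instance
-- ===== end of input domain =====

-- B replaces A's two sequential scans with a single pass that returns on an exact match and remembers the first partial candidate (alternative decomposition, same cost).


-- ===== PORT A =====
-- first loop: return the first f with f.lower() == expected_lower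
def fmfExact : List String → String → Option String
  | [], _ => none
  | f :: rest, el => if PySem.Str.lower f == el then some f else fmfExact rest el

-- second loop: return the first f with expected_lower in f.lower() or f.lower() in expected_lower
def fmfPartial : List String → String → Option String
  | [], _ => none
  | f :: rest, el =>
    if PySem.Str.isIn el (PySem.Str.lower f) || PySem.Str.isIn (PySem.Str.lower f) el then some f
    else fmfPartial rest el

def find_matching_file (files : List String) (expected_filename : String) : Option String :=
  let expected_lower := PySem.Str.lower expected_filename
  match fmfExact files expected_lower with
  | some f => some f
  | none => fmfPartial files expected_lower

-- ===== PORT B =====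
-- single pass: return f on exact match, else remember the first partial candidate in first_partial
def fmfScan : List String → String → Option String → Option String
  | [], _, first_partial => first_partial
  | f :: rest, el, first_partial =>
    let fl := PySem.Str.lower f
    if fl == el then some f
    else fmfScan rest el
      (if first_partial.isNone && (PySem.Str.isIn el fl || PySem.Str.isIn fl el) then some f
       else first_partial)

def find_matching_file_alt (files : List String) (expected_filename : String) : Option String :=
  fmfScan files (PySem.Str.lower expected_filename) none

-- ===== PRECONDITION & SPEC =====
def Spec_find_matching_file (files : List String) (expected_filename : String) (out : Option String) : Prop := out = find_matching_file_alt files expected_filename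
instance (files : List String) (expected_filename : String) (out : Option String) : Decidable (Spec_find_matching_file files expected_filename out) := by unfold Spec_find_matching_file; infer_instance

-- ===== CLAIM (what is proved, stated in full; the proofs are below) =====
def Claim_equal_find_matching_file : Prop := ∀ (files : List String) (expected_filename : String), Dom_find_matching_file files expected_filename → Spec_find_matching_file files expected_filename (find_matching_file files expected_filename)

-- ===== LEMMAS AND PROOFS =====
-- B's scan equals: first exact match if any; otherwise the accumulator if set; otherwise the first partial match.
theorem fmfScan_eq (files : List String) (el : String) (acc : Option String) :
    fmfScan files el acc =
      match fmfExact files el with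
      | some f => some f
      | none => match acc with
        | some a => some a
        | none => fmfPartial files el := by
  induction files generalizing acc with
  | nil => cases acc <;> simp [fmfScan, fmfExact, fmfPartial]
  | cons f rest ih =>
    by_cases hex : PySem.Str.lower f == el
    · simp [fmfScan, fmfExact, hex]
    · cases acc <;> simp [fmfScan, fmfExact, fmfPartial, hex, ih] <;>
        split_ifs <;> simp

-- ===== VERDICT (by name: the statement is the Claim_ definition above) =====
theorem find_matching_file_spec : Claim_equal_find_matching_file := by
  intro files expected_filename _
  unfold Spec_find_matching_file find_matching_file find_matching_file_alt
  rw [fmfScan_eq]
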